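-- pv_equiv track=rewrite | github.com/TsumaR/ExtPointer | extractpoint.py | connect_candidate_point
-- ===== SOURCE A (Python) =====
-- import copy
--
-- def connect_candidate_point(df):
--     candidate = []
--     for n,l in enumerate(df):
--         candidate.append([n])
--         for j in l:
--             for c in candidate:
--                 if c[-1]==n:
--                     cc = copy.copy(c)
--                     cc.append(n+j+1)
--                     candidate.append(cc)
--     candidate = [i for i in candidate if len(i) >= 4]
--     return candidate
-- ===== SOURCE B (Python) =====
-- def connect_candidate_point(df):
--     # Index partial chains by their endpoint so each row extends only its own
--     # bucket instead of rescanning the whole candidate list.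
--     buckets = {}
--     out = []
--     for n, row in enumerate(df):
--         ending = buckets.pop(n, [])
--         ending.append([n])
--         for j in row:
--             t = n + j + 1
--             for c in ending:
--                 cc = c + [t]
--                 buckets.setdefault(t, []).append(cc)
--                 if len(cc) >= 4:
--                     out.append(cc)
--     return out
-- ===== Notes on version B (the rewrite author's own statement) =====
-- stated objective: faster
-- what changed: B indexes partial chains by their endpoint in a dict, so each row extends only the bucket of chains ending at that row instead of rescanning the entire candidate list for every offset; Pre_ excludes inputs containing the offset -1, on which A loops forever (it keeps re-extending the chains it just appended).
import Mathlib
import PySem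

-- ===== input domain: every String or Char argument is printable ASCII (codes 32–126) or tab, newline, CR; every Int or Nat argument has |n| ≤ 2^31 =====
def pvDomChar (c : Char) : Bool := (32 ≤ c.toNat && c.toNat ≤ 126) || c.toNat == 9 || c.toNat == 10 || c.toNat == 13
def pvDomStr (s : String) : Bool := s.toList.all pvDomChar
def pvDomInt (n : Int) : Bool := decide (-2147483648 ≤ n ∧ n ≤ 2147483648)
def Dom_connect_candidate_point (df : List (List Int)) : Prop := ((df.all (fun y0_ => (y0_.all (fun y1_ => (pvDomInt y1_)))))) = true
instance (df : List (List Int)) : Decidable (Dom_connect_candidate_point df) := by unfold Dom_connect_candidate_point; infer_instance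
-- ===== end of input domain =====

-- B indexes partial chains by endpoint in a dict, extending only the current row's bucket instead of rescanning all candidates (objective: faster).

-- ===== PORT A =====
-- Python's inner `for c in candidate` also visits the elements appended during the
-- same scan; on the inputs admitted by Pre_ (no row contains -1) those appended
-- chains end at n+j+1 ≠ n, never satisfy `c[-1] == n`, and append nothing further,
-- so the scan over the snapshot below is exact there (with a -1 offset the Python
-- loop never terminates; those inputs are excluded by Pre_).
def aScan (n j : Int) (cand : List (List Int)) : List (List Int) :=
  cand.foldl (fun acc c =>
    if PySem.List.pyGet? c (-1) == some n then acc ++ [c ++ [n + j + 1]] else acc) []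

def aRow (n : Int) (cand : List (List Int)) (row : List Int) : List (List Int) :=
  row.foldl (fun cand j => cand ++ aScan n j cand) cand

def aLoop (n : Int) (cand : List (List Int)) : List (List Int) → List (List Int)
  | [] => cand
  | row :: rest => aLoop (n + 1) (aRow n (cand ++ [[n]]) row) rest

def connect_candidate_point (df : List (List Int)) : List (List Int) :=
  (aLoop 0 [] df).filter (fun c => 4 ≤ c.length)

-- ===== PORT B =====
-- `buckets.setdefault(t, []).append(cc)` and the conditional `out.append(cc)`
def bPush (t : Int) (st : PySem.Dict Int (List (List Int)) × List (List Int))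
    (c : List Int) : PySem.Dict Int (List (List Int)) × List (List Int) :=
  (st.1.insert t (st.1.getD t [] ++ [c ++ [t]]),
   if 4 ≤ (c ++ [t]).length then st.2 ++ [c ++ [t]] else st.2)

def bRow (n : Int) (ending : List (List Int))
    (st : PySem.Dict Int (List (List Int)) × List (List Int)) (row : List Int) :
    PySem.Dict Int (List (List Int)) × List (List Int) :=
  row.foldl (fun st j => ending.foldl (bPush (n + j + 1)) st) st

def bLoop (n : Int) (st : PySem.Dict Int (List (List Int)) × List (List Int)) :
    List (List Int) → PySem.Dict Int (List (List Int)) × List (List Int)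
  | [] => st
  | row :: rest =>
      bLoop (n + 1) (bRow n (st.1.getD n [] ++ [[n]]) (st.1.erase n, st.2) row) rest

def connect_candidate_point_alt (df : List (List Int)) : List (List Int) :=
  (bLoop 0 (PySem.Dict.empty, []) df).2

-- ===== PRECONDITION & SPEC =====
-- Pre_ excludes inputs in which some row contains the offset -1: there Python A
-- appends chains ending at the current index while scanning for exactly such
-- chains, so its inner loop never terminates (A returns on no such input).
def Pre_connect_candidate_point (df : List (List Int)) : Prop :=
  ∀ l ∈ df, (-1 : Int) ∉ l
instance (df : List (List Int)) : Decidable (Pre_connect_candidate_point df) := by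
  unfold Pre_connect_candidate_point; infer_instance
def pvWitness_connect_candidate_point : List (List Int) := [[0], [0], [0], [0]]

def Spec_connect_candidate_point (df : List (List Int)) (out : List (List Int)) : Prop := out = connect_candidate_point_alt df
instance (df : List (List Int)) (out : List (List Int)) : Decidable (Spec_connect_candidate_point df out) := by unfold Spec_connect_candidate_point; infer_instance

-- ===== CLAIM (what is proved, stated in full; the proofs are below) =====
def Claim_equal_connect_candidate_point : Prop := ∀ (df : List (List Int)), Dom_connect_candidate_point df → Pre_connect_candidate_point df → Spec_connect_candidate_point df (connect_candidate_point df)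

-- ===== LEMMAS AND PROOFS =====

-- The coupling invariant between A's flat candidate list and B's (buckets, out):
-- out is the ≥4 filter of the candidates built so far, and for every endpoint
-- t ≥ n (the indices still to be processed) bucket t holds, in order, exactly
-- the candidates ending at t.
def pvInv (n : Int) (cand : List (List Int))
    (st : PySem.Dict Int (List (List Int)) × List (List Int)) : Prop :=
  st.2 = cand.filter (fun c => 4 ≤ c.length)
  ∧ ∀ t : Int, n ≤ t →
      st.1.getD t [] = cand.filter (fun c => PySem.List.pyGet? c (-1) == some t)

theorem getD_erase_of_ne (d : PySem.Dict Int (List (List Int))) (k t : Int) (h : t ≠ k) (v : List (List Int)) :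
    (d.erase k).getD t v = d.getD t v := by
  simp only [PySem.Dict.erase, PySem.Dict.getD, PySem.Dict.get?, List.find?_filter]
  have hp : (fun (a : Int × List (List Int)) => decide ((!a.1 == k) = true ∧ (a.1 == t) = true))
      = (fun (a : Int × List (List Int)) => a.1 == t) := by
    funext a
    by_cases ha : a.1 = t
    · subst ha; simp [h]
    · simp [ha]
  rw [hp]

theorem aScan_eq (n j : Int) (cand : List (List Int)) :
    aScan n j cand
      = (cand.filter (fun c => PySem.List.pyGet? c (-1) == some n)).map (fun c => c ++ [n + j + 1]) := by
  unfold aScan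
  rw [PySem.List.foldl_append_if]
  simp

theorem bFold_getD (E : List (List Int)) (t : Int)
    (st : PySem.Dict Int (List (List Int)) × List (List Int)) (s : Int) :
    (E.foldl (bPush t) st).1.getD s []
      = st.1.getD s [] ++ (if s = t then E.map (fun c => c ++ [t]) else []) := by
  induction E generalizing st with
  | nil => simp
  | cons c E ih =>
    simp only [List.foldl_cons, ih, List.map_cons]
    by_cases hs : s = t
    · subst hs
      simp [bPush, PySem.Dict.getD_insert_self]
    · simp [bPush, PySem.Dict.getD_insert, hs]

theorem bFold_out (E : List (List Int)) (t : Int)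
    (st : PySem.Dict Int (List (List Int)) × List (List Int)) :
    (E.foldl (bPush t) st).2
      = st.2 ++ (E.map (fun c => c ++ [t])).filter (fun c => 4 ≤ c.length) := by
  induction E generalizing st with
  | nil => simp
  | cons c E ih =>
    simp only [List.foldl_cons, ih, List.map_cons, List.filter_cons]
    by_cases hc : 3 ≤ c.length <;> simp [bPush, hc]

theorem filter_last_map (E : List (List Int)) (t s : Int) :
    (E.map (fun c => c ++ [t])).filter (fun c => PySem.List.pyGet? c (-1) == some s)
      = if s = t then E.map (fun c => c ++ [t]) else [] := by
  rw [List.filter_map]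
  by_cases h : s = t
  · subst h
    simp [Function.comp_def, PySem.List.pyGet?_neg_one_append_singleton, List.filter_true]
  · have hts : (t == s) = false := by simp [Ne.symm h]
    simp [Function.comp_def, PySem.List.pyGet?_neg_one_append_singleton, hts, h]

theorem pvInner (n : Int) (E : List (List Int)) :
    ∀ (row : List Int) (cand : List (List Int))
      (st : PySem.Dict Int (List (List Int)) × List (List Int)),
      (-1 : Int) ∉ row →
      st.2 = cand.filter (fun c => 4 ≤ c.length) →
      (∀ t : Int, n + 1 ≤ t →
        st.1.getD t [] = cand.filter (fun c => PySem.List.pyGet? c (-1) == some t)) →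
      cand.filter (fun c => PySem.List.pyGet? c (-1) == some n) = E →
      (bRow n E st row).2 = (aRow n cand row).filter (fun c => 4 ≤ c.length)
      ∧ (∀ t : Int, n + 1 ≤ t →
          (bRow n E st row).1.getD t []
            = (aRow n cand row).filter (fun c => PySem.List.pyGet? c (-1) == some t))
      ∧ (aRow n cand row).filter (fun c => PySem.List.pyGet? c (-1) == some n) = E := by
  intro row
  induction row with
  | nil =>
    intro cand st _ h1 h2 h3
    simp only [bRow, aRow, List.foldl_nil]
    exact ⟨h1, h2, h3⟩
  | cons j row ih =>
    intro cand st hrow h1 h2 h3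
    have hj : j ≠ -1 := by
      intro hj; exact hrow (hj ▸ List.mem_cons_self)
    have hrow' : (-1 : Int) ∉ row := fun h => hrow (List.mem_cons_of_mem _ h)
    have ht_ne : n + j + 1 ≠ n := by omega
    -- one step
    have hscan : aScan n j cand = E.map (fun c => c ++ [n + j + 1]) := by
      rw [aScan_eq, h3]
    have hA : aRow n cand (j :: row) = aRow n (cand ++ E.map (fun c => c ++ [n + j + 1])) row := by
      simp [aRow, hscan]
    have hB : bRow n E st (j :: row) = bRow n E (E.foldl (bPush (n + j + 1)) st) row := by
      simp [bRow]
    rw [hA, hB]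
    apply ih (cand ++ E.map (fun c => c ++ [n + j + 1])) (E.foldl (bPush (n + j + 1)) st) hrow'
    · rw [bFold_out, h1, List.filter_append]
    · intro t ht
      rw [bFold_getD, h2 t ht, List.filter_append, filter_last_map]
    · rw [List.filter_append, filter_last_map, h3, if_neg (Ne.symm ht_ne), List.append_nil]

theorem pvLoop_eq : ∀ (df : List (List Int)) (n : Int) (cand : List (List Int))
    (st : PySem.Dict Int (List (List Int)) × List (List Int)),
    (∀ l ∈ df, (-1 : Int) ∉ l) → pvInv n cand st →
    (bLoop n st df).2 = (aLoop n cand df).filter (fun c => 4 ≤ c.length) := by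
  intro df
  induction df with
  | nil =>
    intro n cand st _ hInv
    simp only [bLoop, aLoop]
    exact hInv.1
  | cons row rest ih =>
    intro n cand st hPre hInv
    have hrow : (-1 : Int) ∉ row := hPre row List.mem_cons_self
    have hrest : ∀ l ∈ rest, (-1 : Int) ∉ l := fun l hl => hPre l (List.mem_cons_of_mem _ hl)
    -- set up the row-level hypotheses on cand ++ [[n]] and (erase n, out)
    have hlast_n : PySem.List.pyGet? [n] (-1) = some n := by
      simp [PySem.List.pyGet?_neg_one]
    have h1 : st.2 = (cand ++ [[n]]).filter (fun c => 4 ≤ c.length) := by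
      rw [List.filter_append, hInv.1]
      simp
    have h2 : ∀ t : Int, n + 1 ≤ t →
        (st.1.erase n).getD t [] = (cand ++ [[n]]).filter (fun c => PySem.List.pyGet? c (-1) == some t) := by
      intro t ht
      rw [getD_erase_of_ne _ _ _ (by omega), hInv.2 t (by omega), List.filter_append]
      have : PySem.List.pyGet? [n] (-1) ≠ some t := by
        rw [hlast_n]; intro h; injection h with h; omega
      simp [this]
    have h3 : (cand ++ [[n]]).filter (fun c => PySem.List.pyGet? c (-1) == some n)
        = st.1.getD n [] ++ [[n]] := by
      rw [List.filter_append, hInv.2 n le_rfl]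
      simp [hlast_n]
    obtain ⟨g1, g2, -⟩ :=
      pvInner n (st.1.getD n [] ++ [[n]]) row (cand ++ [[n]]) (st.1.erase n, st.2)
        hrow h1 h2 h3
    simp only [bLoop, aLoop]
    exact ih (n + 1) _ _ hrest ⟨g1, g2⟩

-- ===== VERDICT (by name: the statement is the Claim_ definition above) =====
theorem connect_candidate_point_spec : Claim_equal_connect_candidate_point := by
  intro df _ hPre
  unfold Spec_connect_candidate_point connect_candidate_point connect_candidate_point_alt
  refine (pvLoop_eq df 0 [] (PySem.Dict.empty, []) hPre ?_).symm
  constructor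
  · rfl
  · intro t _
    simp [PySem.Dict.getD_empty]
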